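-- pv_equiv track=rewrite | github.com/shaunakd/personal | src/python_projects/trading_interview/assignments/words_with_consecutive_letters.py | get_words_with_consecutive_letters
-- ===== SOURCE A (Python) =====
-- def get_words_with_consecutive_letters(words: list[str], n: int) -> list[str]:
--     """Returns a list containing only the words that have n consecutive letters of the alphabet"""
--     assert n >= 0, "Only nonnegative integer values of n are allowed."
--     words_with_consecutive_letters = []
--
--     if n == 1:
--         words_with_consecutive_letters = words
--     elif n > 1:
--         for word in words:
--             count = 1
--             for i in range(1, len(word)):
--                 if ord(word[i]) - ord(word[i - 1]) == 1:
--                     count += 1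
--                     if count == n:
--                         words_with_consecutive_letters.append(word)
--                         break
--                 else:
--                     count = 1  # Reset count if characters are not consecutive
--
--     return words_with_consecutive_letters
-- ===== SOURCE B (Python) =====
-- def get_words_with_consecutive_letters(words: list[str], n: int) -> list[str]:
--     """Returns a list containing only the words that have n consecutive letters of the alphabet"""
--     assert n >= 0, "Only nonnegative integer values of n are allowed."
--     if n == 0:
--         return []
--     if n == 1:
--         return words
--     result = []
--     for word in words:
--         for i in range(len(word) - n + 1):
--             if all(ord(word[i + j]) - ord(word[i + j - 1]) == 1 for j in range(1, n)):
--                 result.append(word)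
--                 break
--     return result
-- ===== Notes on version B (the rewrite author's own statement) =====
-- stated objective: alternative
-- what changed: Replaces A's single scan with a running run-length counter by an explicit sliding-window check: for each start index test (via all over a generator) whether the next n characters are consecutive, appending the word on the first matching window.
import Mathlib
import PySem

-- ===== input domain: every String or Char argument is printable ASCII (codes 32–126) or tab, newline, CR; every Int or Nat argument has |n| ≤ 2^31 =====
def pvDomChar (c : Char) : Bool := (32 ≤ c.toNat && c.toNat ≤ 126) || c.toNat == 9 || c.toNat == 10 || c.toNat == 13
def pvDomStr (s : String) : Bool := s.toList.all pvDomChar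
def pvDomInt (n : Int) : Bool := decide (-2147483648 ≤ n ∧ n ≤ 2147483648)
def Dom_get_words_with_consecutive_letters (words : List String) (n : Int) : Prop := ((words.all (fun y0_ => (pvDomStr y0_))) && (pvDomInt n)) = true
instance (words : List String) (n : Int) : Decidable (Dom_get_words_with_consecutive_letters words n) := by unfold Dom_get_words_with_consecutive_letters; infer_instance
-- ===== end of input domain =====

-- B replaces A's running run-length counter by an explicit sliding-window check per start index (objective: alternative).

-- ===== PORT A =====
-- inner loop of A over word[1:], carrying the previous char and the running count; returns whether
-- the 'count == n: append and break' point was reached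
def pvARun (prev : Char) (rest : List Char) (count n : Int) : Bool :=
  match rest with
  | [] => false
  | c :: cs =>
    if (c.toNat : Int) - (prev.toNat : Int) = 1 then
      if count + 1 = n then true else pvARun c cs (count + 1) n
    else
      pvARun c cs 1 n

def get_words_with_consecutive_letters (words : List String) (n : Int) : List String :=
  if n = 1 then words
  else if n > 1 then
    words.foldl (fun acc word =>
      match word.toList with
      | [] => acc
      | c :: cs => if pvARun c cs 1 n then acc ++ [word] else acc) []
  else []

-- ===== PORT B =====
-- all(ord(word[i+j]) - ord(word[i+j-1]) == 1 for j in range(1, n)); every index i+j, i+j-1 used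
-- lies within the word, so getD with a dummy default is exact here
def pvBWindow (l : List Char) (i m : Nat) : Bool :=
  (List.range' 1 (m - 1)).all (fun j =>
    decide (((l.getD (i + j) ' ').toNat : Int) - ((l.getD (i + j - 1) ' ').toNat : Int) = 1))

-- for i in range(len(word) - n + 1); Nat subtraction l.length + 1 - m gives the same (empty when
-- Python's len-n+1 is negative or zero) range
def pvBScan (l : List Char) (m : Nat) : Bool :=
  (List.range (l.length + 1 - m)).any (fun i => pvBWindow l i m)

def get_words_with_consecutive_letters_alt (words : List String) (n : Int) : List String :=
  if n = 0 then []
  else if n = 1 then words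
  else words.filter (fun word => pvBScan word.toList n.toNat)

-- ===== PRECONDITION & SPEC =====
-- A's assert raises AssertionError for n < 0; Pre_ excludes exactly those inputs.
def Pre_get_words_with_consecutive_letters (words : List String) (n : Int) : Prop := 0 ≤ n
instance (words : List String) (n : Int) : Decidable (Pre_get_words_with_consecutive_letters words n) := by unfold Pre_get_words_with_consecutive_letters; infer_instance
def pvWitness_get_words_with_consecutive_letters : List String × Int := (["abcq", "zx"], 3)

def Spec_get_words_with_consecutive_letters (words : List String) (n : Int) (out : List String) : Prop := out = get_words_with_consecutive_letters_alt words n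
instance (words : List String) (n : Int) (out : List String) : Decidable (Spec_get_words_with_consecutive_letters words n out) := by unfold Spec_get_words_with_consecutive_letters; infer_instance

-- ===== CLAIM (what is proved, stated in full; the proofs are below) =====
def Claim_equal_get_words_with_consecutive_letters : Prop := ∀ (words : List String) (n : Int), Dom_get_words_with_consecutive_letters words n → Pre_get_words_with_consecutive_letters words n → Spec_get_words_with_consecutive_letters words n (get_words_with_consecutive_letters words n)

-- ===== LEMMAS AND PROOFS =====

-- 'pvExt prev l k' : the first k chars of l continue a consecutive run from prev
def pvExt (prev : Char) (l : List Char) (k : Nat) : Bool :=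
  match k, l with
  | 0, _ => true
  | _ + 1, [] => false
  | k + 1, c :: cs => (decide ((c.toNat : Int) - (prev.toNat : Int) = 1)) && pvExt c cs k

-- recursive reference form of the sliding-window scan
def pvWinRec (l : List Char) (m : Nat) : Bool :=
  match l with
  | [] => false
  | c :: cs => pvExt c cs (m - 1) || pvWinRec cs m

theorem pvExt_mono (l : List Char) (prev : Char) (j k : Nat) (hjk : j ≤ k)
    (h : pvExt prev l k = true) : pvExt prev l j = true := by
  induction l generalizing prev j k with
  | nil =>
    cases k with
    | zero => have : j = 0 := by omega
              subst this; rfl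
    | succ k => simp [pvExt] at h
  | cons c cs ih =>
    cases j with
    | zero => rfl
    | succ j =>
      cases k with
      | zero => omega
      | succ k =>
        simp only [pvExt, Bool.and_eq_true] at h ⊢
        exact ⟨h.1, ih c j k (by omega) h.2⟩

theorem pvExt_long (l : List Char) (prev : Char) (k : Nat) (h : l.length < k) :
    pvExt prev l k = false := by
  induction l generalizing prev k with
  | nil =>
    cases k with
    | zero => omega
    | succ k => rfl
  | cons c cs ih =>
    cases k with
    | zero => simp at h
    | succ k =>
      simp only [pvExt, Bool.and_eq_false_iff]
      right
      exact ih c k (by simp at h; omega)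

theorem pvWinRec_short (l : List Char) (m : Nat) (h : l.length < m) :
    pvWinRec l m = false := by
  induction l with
  | nil => rfl
  | cons c cs ih =>
    simp only [pvWinRec, Bool.or_eq_false_iff]
    exact ⟨pvExt_long cs c (m - 1) (by simp at h; omega), ih (by simp at h; omega)⟩

-- pvExt as a ∀-statement over the in-range adjacent pairs
theorem pvExt_iff (l : List Char) (prev : Char) (k : Nat) (hk : k ≤ l.length) :
    pvExt prev l k = true ↔
      ∀ j < k, (((prev :: l).getD (j + 1) ' ').toNat : Int) - (((prev :: l).getD j ' ').toNat : Int) = 1 := by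
  induction l generalizing prev k with
  | nil =>
    have : k = 0 := by simp at hk; omega
    subst this
    simp [pvExt]
  | cons c cs ih =>
    cases k with
    | zero => simp [pvExt]
    | succ k =>
      simp only [pvExt, Bool.and_eq_true, decide_eq_true_eq]
      rw [ih c k (by simpa using hk)]
      constructor
      · rintro ⟨h1, h2⟩ j hj
        cases j with
        | zero => simpa using h1
        | succ j => simpa using h2 j (by omega)
      · intro h
        exact ⟨by simpa using h 0 (by omega), fun j hj => by simpa using h (j + 1) (by omega)⟩

-- characterization of A's inner loop: with a running credit of 'count', it succeeds iff the run
-- through prev extends n - count more steps, or a full window occurs later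
theorem pvARun_eq (n : Int) (rest : List Char) (prev : Char) (count : Int)
    (h1 : 1 ≤ count) (h2 : count < n) :
    pvARun prev rest count n = (pvExt prev rest (n - count).toNat || pvWinRec rest n.toNat) := by
  induction rest generalizing prev count with
  | nil =>
    have : (n - count).toNat = ((n - count).toNat - 1) + 1 := by omega
    rw [this]
    rfl
  | cons c cs ih =>
    by_cases hd : (c.toNat : Int) - (prev.toNat : Int) = 1
    · by_cases hn : count + 1 = n
      · have hnc : (n - count).toNat = 1 := by omega
        simp [pvARun, hd, hn, hnc, pvExt]
      · have hnc : (n - count).toNat = ((n - (count + 1)).toNat) + 1 := by omega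
        rw [pvARun, if_pos hd, if_neg hn, ih c (count + 1) (by omega) (by omega), hnc]
        simp only [pvExt, pvWinRec, hd, decide_true, Bool.true_and]
        by_cases he : pvExt c cs (n.toNat - 1) = true
        · have hk : pvExt c cs (n - (count + 1)).toNat = true :=
            pvExt_mono cs c _ _ (by omega) he
          simp [he, hk]
        · simp only [Bool.not_eq_true] at he
          simp [he]
    · have hnc : (n - count).toNat = ((n - count).toNat - 1) + 1 := by omega
      have hnn : (n - 1).toNat = n.toNat - 1 := by omega
      rw [pvARun, if_neg hd, ih c 1 le_rfl (by omega), hnc, hnn]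
      simp [pvExt, pvWinRec, hd]

-- helper: congruence for List.all under membership
theorem pvAllCongrMem {α : Type} {l : List α} {f g : α → Bool}
    (h : ∀ x ∈ l, f x = g x) : l.all f = l.all g := by
  induction l with
  | nil => rfl
  | cons x xs ih =>
    simp only [List.all_cons, h x (List.mem_cons_self), ih (fun y hy => h y (List.mem_cons_of_mem _ hy))]

-- shifting a window one step into the list
theorem pvBWindow_shift (cs : List Char) (c : Char) (i m : Nat) :
    pvBWindow (c :: cs) (i + 1) m = pvBWindow cs i m := by
  unfold pvBWindow
  apply pvAllCongrMem
  intro j hj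
  have hj1 : 1 ≤ j := (List.mem_range'_1.mp hj).1
  have e1 : i + 1 + j = (i + j) + 1 := by omega
  have e2 : i + j + 1 - 1 = (i + j - 1) + 1 := by omega
  show decide _ = decide _
  rw [e1, e2, List.getD_cons_succ, List.getD_cons_succ]

-- the window at index 0 is exactly pvExt of the head
theorem pvBWindow_zero (c : Char) (cs : List Char) (m : Nat) (hm : m - 1 ≤ cs.length) :
    pvBWindow (c :: cs) 0 m = pvExt c cs (m - 1) := by
  rw [Bool.eq_iff_iff]
  rw [pvExt_iff cs c (m - 1) hm]
  unfold pvBWindow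
  simp only [List.all_eq_true, decide_eq_true_eq, Nat.zero_add]
  constructor
  · intro h j hj
    have := h (j + 1) (List.mem_range'_1.mpr ⟨by omega, by omega⟩)
    simpa using this
  · intro h j hj
    have hj' := List.mem_range'_1.mp hj
    have := h (j - 1) (by omega)
    have ej : j - 1 + 1 = j := by omega
    rw [ej] at this
    simpa using this

-- B's index scan equals the recursive sliding-window reference
theorem pvBScan_eq (l : List Char) (m : Nat) (hm : 2 ≤ m) : pvBScan l m = pvWinRec l m := by
  induction l with
  | nil =>
    have h0 : ([] : List Char).length + 1 - m = 0 := by simp only [List.length_nil]; omega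
    rw [pvBScan, h0]
    rfl
  | cons c cs ih =>
    by_cases hlen : m ≤ cs.length + 1
    · have hr : (c :: cs).length + 1 - m = (cs.length + 1 - m) + 1 := by simp only [List.length_cons]; omega
      rw [pvBScan, hr, List.range_succ_eq_map]
      simp only [List.any_cons, List.any_map, Function.comp_def]
      rw [pvBWindow_zero c cs m (by omega)]
      have hshift : (List.range (cs.length + 1 - m)).any (fun i => pvBWindow (c :: cs) (i + 1) m)
          = (List.range (cs.length + 1 - m)).any (fun i => pvBWindow cs i m) :=
        PySem.List.any_congr_mem (fun i _ => pvBWindow_shift cs c i m)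
      rw [pvWinRec, ← ih, pvBScan, ← hshift]
    · have h0 : (c :: cs).length + 1 - m = 0 := by simp only [List.length_cons]; omega
      rw [pvBScan, h0, pvWinRec_short _ m (by simp only [List.length_cons]; omega)]
      rfl

-- per-word: A's inner loop (started with count = 1) agrees with B's window scan
theorem pvWord_eq (n : Int) (hn : 2 ≤ n) (w : String) :
    (match w.toList with | [] => false | c :: cs => pvARun c cs 1 n)
      = pvBScan w.toList n.toNat := by
  rw [pvBScan_eq _ _ (by omega)]
  cases hwl : w.toList with
  | nil => rfl
  | cons c cs =>
    show pvARun c cs 1 n = pvWinRec (c :: cs) n.toNat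
    rw [pvARun_eq n cs c 1 le_rfl (by omega), pvWinRec]
    have : (n - 1).toNat = n.toNat - 1 := by omega
    rw [this]

-- ===== VERDICT (by name: the statement is the Claim_ definition above) =====
theorem get_words_with_consecutive_letters_spec : Claim_equal_get_words_with_consecutive_letters := by
  intro words n _ hpre
  unfold Spec_get_words_with_consecutive_letters
  unfold get_words_with_consecutive_letters get_words_with_consecutive_letters_alt
  unfold Pre_get_words_with_consecutive_letters at hpre
  by_cases h1 : n = 1
  · simp [h1]
  · by_cases h0 : n = 0
    · simp [h0]
    · have hn : 2 ≤ n := by omega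
      rw [if_neg h1, if_pos (by omega), if_neg h0, if_neg h1]
      have hfun : (fun (acc : List String) (word : String) =>
          match word.toList with
          | [] => acc
          | c :: cs => if pvARun c cs 1 n then acc ++ [word] else acc)
        = (fun (acc : List String) (word : String) =>
            if (match word.toList with | [] => false | c :: cs => pvARun c cs 1 n)
            then acc ++ [word] else acc) := by
        funext acc word
        cases word.toList <;> simp
      rw [hfun, PySem.List.foldl_append_if_eq_filter, List.nil_append]
      exact List.filter_congr (fun w _ => pvWord_eq n hn w)
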